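-- pv_equiv track=rewrite | github.com/utkarsh512/CreateDebateScraper | src/nested/scrape.py | getPolarityandTime
-- ===== SOURCE A (Python) =====
-- def getPolarityandTime(x):
--     try:
--         y = str(x).split()
--         tic = y[3][10:-1]
--         pol = []
--         it = -2
--         while y[it] != 'Side:':
--             pol.append(y[it])
--             it -= 1
--         pol = pol[::-1]
--         pol = ' '.join(pol)
--         return (tic, pol)
--     except:
--         return ('Not Available', 'Not Available')
-- ===== SOURCE B (Python) =====
-- def getPolarityandTime(x):
--     y = str(x).split()
--     if len(y) < 4:
--         return ('Not Available', 'Not Available')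
--     tic = y[3][10:-1]
--     body = y[:-1]
--     if 'Side:' not in body:
--         return ('Not Available', 'Not Available')
--     idx = len(body) - 1 - body[::-1].index('Side:')
--     return (tic, ' '.join(body[idx + 1:]))
-- ===== Notes on version B (the rewrite author's own statement) =====
-- stated objective: simpler
-- what changed: Replaces the try/except with explicit length and membership guards and the backward while-loop that appends tokens then reverses with locating the last 'Side:' among y[:-1] (via reversed index) and slicing-joining the tokens after it.
import Mathlib
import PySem

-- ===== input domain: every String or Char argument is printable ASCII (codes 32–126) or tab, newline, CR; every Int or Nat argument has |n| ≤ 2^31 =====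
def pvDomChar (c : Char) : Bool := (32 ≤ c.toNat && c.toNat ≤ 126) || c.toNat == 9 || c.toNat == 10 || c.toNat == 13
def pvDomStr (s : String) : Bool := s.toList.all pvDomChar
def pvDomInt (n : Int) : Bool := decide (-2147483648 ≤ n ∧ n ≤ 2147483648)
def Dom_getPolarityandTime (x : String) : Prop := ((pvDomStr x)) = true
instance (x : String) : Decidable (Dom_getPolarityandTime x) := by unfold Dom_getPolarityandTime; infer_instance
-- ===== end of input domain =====

-- B replaces A's try/except and backward append-then-reverse while-loop with explicit guards
-- plus locate-the-last-'Side:'-then-slice (objective: simpler). Both are total.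

-- ===== PORT A =====
-- the while-loop 'while y[it] != 'Side:': pol.append(y[it]); it -= 1'.
-- 'none' is the exception path (IndexError when it runs off the front); fuel y.length + 1
-- strictly exceeds the number of iterations the loop can make before pyGet? returns none.
def pvLoopA (y : List String) : Nat → Int → List String → Option (List String)
  | 0, _, _ => none
  | fuel + 1, it, pol =>
    match PySem.List.pyGet? y it with
    | none => none                    -- IndexError → caught by the bare except
    | some v => if v = "Side:" then some pol else pvLoopA y fuel (it - 1) (pol ++ [v])

def getPolarityandTime (x : String) : String × String :=
  let y := PySem.Str.split₀ x
  match PySem.List.pyGet? y 3 with    -- y[3]; none = IndexError → except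
  | none => ("Not Available", "Not Available")
  | some y3 =>
    let tic := PySem.Str.slice y3 (some 10) (some (-1))   -- y[3][10:-1]
    match pvLoopA y (y.length + 1) (-2) [] with
    | none => ("Not Available", "Not Available")
    | some pol => (tic, PySem.Str.join " " pol.reverse)   -- pol[::-1] is reverse (PySem.List.slice?_none_none_neg_one)

-- ===== PORT B =====
def getPolarityandTime_alt (x : String) : String × String :=
  let y := PySem.Str.split₀ x
  if y.length < 4 then ("Not Available", "Not Available")
  else
    let tic := PySem.Str.slice (PySem.List.pyGetD y 3 "") (some 10) (some (-1))  -- y[3]; in range by the guard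
    let body := PySem.List.slice y none (some (-1))                              -- y[:-1]
    if "Side:" ∈ body then
      -- body[::-1].index('Side:'); ValueError impossible: membership just checked
      let i := (PySem.List.index? body.reverse "Side:").getD 0
      let idx := body.length - 1 - i
      (tic, PySem.Str.join " " (PySem.List.slice body (some ((idx : Int) + 1)) none))  -- body[idx+1:]
    else ("Not Available", "Not Available")

-- ===== PRECONDITION & SPEC =====
def Spec_getPolarityandTime (x : String) (out : String × String) : Prop := out = getPolarityandTime_alt x
instance (x : String) (out : String × String) : Decidable (Spec_getPolarityandTime x out) := by unfold Spec_getPolarityandTime; infer_instance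

-- ===== CLAIM (what is proved, stated in full; the proofs are below) =====
def Claim_equal_getPolarityandTime : Prop := ∀ (x : String), Dom_getPolarityandTime x → Spec_getPolarityandTime x (getPolarityandTime x)

-- ===== LEMMAS AND PROOFS =====

-- the loop reads y at negative index -(2+m); that is element m of y.dropLast.reverse
lemma pvGet_rev (y : List String) (m : Nat) :
    PySem.List.pyGet? y (-(2 + (m : Int))) = y.dropLast.reverse[m]? := by
  by_cases h : 2 + m ≤ y.length
  · rw [show (-(2 + (m : Int))) = -((2 + m : Nat) : Int) by push_cast; ring,
      PySem.List.pyGet?_neg_natCast _ _ (by omega) (by exact_mod_cast h)]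
    have hm : m < y.dropLast.reverse.length := by simp [List.length_dropLast]; omega
    rw [List.getElem?_eq_getElem (by omega), List.getElem?_eq_getElem hm]
    congr 1
    rw [List.getElem_reverse, List.getElem_dropLast]
    congr 1
    simp [List.length_dropLast]
    omega
  · rw [(PySem.List.pyGet?_eq_none_iff _ _).2, List.getElem?_eq_none]
    · simp [List.length_dropLast]; omega
    · unfold PySem.Raise.InRange
      omega

-- loop characterization: the loop walks the suffix of r := y.dropLast.reverse starting at
-- position m, collecting tokens until it meets 'Side:' (none = it runs off the front)
lemma pvLoopA_eq (y : List String) (s : List String) :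
    ∀ (m : Nat) (pol : List String) (fuel : Nat),
      y.dropLast.reverse.drop m = s → s.length + 1 ≤ fuel →
      pvLoopA y fuel (-(2 + (m : Int))) pol =
        if "Side:" ∈ s then some (pol ++ s.takeWhile (fun t => !(t == "Side:"))) else none := by
  induction s with
  | nil =>
    intro m pol fuel hdrop hfuel
    obtain ⟨f, rfl⟩ : ∃ f, fuel = f + 1 := ⟨fuel - 1, by omega⟩
    have hget : PySem.List.pyGet? y (-(2 + (m : Int))) = none := by
      rw [pvGet_rev, ← List.head?_drop, hdrop]; rfl
    simp only [pvLoopA, hget, List.not_mem_nil, if_neg (fun h => h)]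
  | cons v rest ih =>
    intro m pol fuel hdrop hfuel
    obtain ⟨f, rfl⟩ : ∃ f, fuel = f + 1 := ⟨fuel - 1, by omega⟩
    have hget : PySem.List.pyGet? y (-(2 + (m : Int))) = some v := by
      rw [pvGet_rev, ← List.head?_drop, hdrop]; rfl
    simp only [pvLoopA, hget]
    by_cases hv : v = "Side:"
    · subst hv
      simp
    · have hstep : (-(2 + (m : Int)) - 1) = -(2 + ((m + 1 : Nat) : Int)) := by push_cast; ring
      have hdrop' : y.dropLast.reverse.drop (m + 1) = rest := by
        rw [← List.tail_drop, hdrop]; rfl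
      rw [if_neg hv, hstep, ih (m + 1) (pol ++ [v]) f hdrop' (by simp at hfuel ⊢; omega)]
      simp [List.mem_cons, hv, Ne.symm hv, List.append_assoc]

lemma pv_main (x : String) : getPolarityandTime x = getPolarityandTime_alt x := by
  unfold getPolarityandTime getPolarityandTime_alt
  dsimp only
  set y := PySem.Str.split₀ x with hy
  rw [PySem.List.slice_to_neg_one]
  have hloop := pvLoopA_eq y y.dropLast.reverse 0 [] (y.length + 1) (by simp)
      (by simp only [List.length_reverse, List.length_dropLast]; omega)
  rw [show (-2 : Int) = -(2 + ((0 : Nat) : Int)) by norm_num, hloop]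
  by_cases hlen : y.length < 4
  · have h3 : PySem.List.pyGet? y 3 = none := by
      rw [(PySem.List.pyGet?_eq_none_iff _ _).2]
      unfold PySem.Raise.InRange
      omega
    simp [h3, hlen]
  · obtain ⟨v3, h3⟩ : ∃ v, PySem.List.pyGet? y 3 = some v := by
      rcases h : PySem.List.pyGet? y 3 with _ | v
      · rw [PySem.List.pyGet?_eq_none_iff] at h
        exact absurd (by unfold PySem.Raise.InRange; omega) h
      · exact ⟨v, rfl⟩
    have hD : PySem.List.pyGetD y 3 "" = v3 := by
      unfold PySem.List.pyGetD
      rw [h3]; rfl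
    rw [h3, hD]
    simp only [if_neg hlen]
    by_cases hmem : "Side:" ∈ y.dropLast
    · rw [if_pos ((List.mem_reverse).2 hmem), if_pos hmem]
      dsimp only
      obtain ⟨i, hi⟩ : ∃ i, PySem.List.index? y.dropLast.reverse "Side:" = some i :=
        Option.isSome_iff_exists.1 ((PySem.List.index?_isSome_iff _ _).2 ((List.mem_reverse).2 hmem))
      obtain ⟨pre, suf, hsplit, hlen_pre, hnotin⟩ := (PySem.List.index?_eq_some_iff _ _ _).1 hi
      have htake : (y.dropLast.reverse).takeWhile (fun t => !(t == "Side:")) = pre := by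
        rw [hsplit, List.takeWhile_append]
        have hall : ∀ a ∈ pre, (fun t => !(t == "Side:")) a = true := by
          intro a ha
          simp only [Bool.not_eq_eq_eq_not, Bool.not_true, beq_eq_false_iff_ne, ne_eq]
          exact fun h => hnotin (h ▸ ha)
        rw [if_pos]
        · simp
        · rw [List.takeWhile_eq_self_iff.2 hall]
      have hidx : y.dropLast.length - 1 - ((PySem.List.index? y.dropLast.reverse "Side:").getD 0) = suf.length := by
        rw [hi]
        have h1 : y.dropLast.length = y.dropLast.reverse.length := by simp
        rw [h1, hsplit]
        simp [← hlen_pre]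
      have hdrop : y.dropLast.drop (suf.length + 1) = pre.reverse := by
        have h2 : y.dropLast = suf.reverse ++ "Side:" :: pre.reverse := by
          have := congrArg List.reverse hsplit
          simpa using this
        rw [h2, show suf.length + 1 = suf.reverse.length + 1 by simp, List.drop_append]
        simp
      rw [htake, hidx, PySem.List.slice_from _ (by omega)]
      rw [show ((suf.length : Int) + 1).toNat = suf.length + 1 by omega, hdrop]
      simp
    · rw [if_neg (fun h => hmem ((List.mem_reverse).1 h)), if_neg hmem]

-- ===== VERDICT (by name: the statement is the Claim_ definition above) =====
theorem getPolarityandTime_spec : Claim_equal_getPolarityandTime := by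
  intro x _
  exact pv_main x
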